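-- pv_equiv track=rewrite | github.com/frankweng-reas/NeuroSme2.0 | backend/app/services/compute_engine_sql_v4.py | _divide_num_den
-- ===== SOURCE A (Python) =====
-- def _divide_num_den(formula: str) -> tuple[str | None, str | None]:
--     s = formula.strip()
--     if "/" not in s:
--         return None, None
--     depth = 0
--     split_at = -1
--     for i, ch in enumerate(s):
--         if ch == "(":
--             depth += 1
--         elif ch == ")":
--             depth -= 1
--         elif ch == "/" and depth == 0:
--             split_at = i
--             break
--     if split_at < 0:
--         return None, None
--     return s[:split_at].strip(), s[split_at + 1:].strip()
-- ===== SOURCE B (Python) =====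
-- def _divide_num_den(formula: str) -> tuple[str | None, str | None]:
--     s = formula.strip()
--     slash_positions = [i for i, ch in enumerate(s) if ch == "/"]
--     for i in slash_positions:
--         pre = s[:i]
--         if pre.count("(") == pre.count(")"):
--             return s[:i].strip(), s[i + 1:].strip()
--     return None, None
-- ===== Notes on version B (the rewrite author's own statement) =====
-- stated objective: alternative
-- what changed: B first collects every slash position in one staged pass, then tests each candidate by freshly counting opening and closing parentheses in its prefix (balanced prefix = depth zero), instead of A's single stateful depth-tracking scan with break.
import Mathlib
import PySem

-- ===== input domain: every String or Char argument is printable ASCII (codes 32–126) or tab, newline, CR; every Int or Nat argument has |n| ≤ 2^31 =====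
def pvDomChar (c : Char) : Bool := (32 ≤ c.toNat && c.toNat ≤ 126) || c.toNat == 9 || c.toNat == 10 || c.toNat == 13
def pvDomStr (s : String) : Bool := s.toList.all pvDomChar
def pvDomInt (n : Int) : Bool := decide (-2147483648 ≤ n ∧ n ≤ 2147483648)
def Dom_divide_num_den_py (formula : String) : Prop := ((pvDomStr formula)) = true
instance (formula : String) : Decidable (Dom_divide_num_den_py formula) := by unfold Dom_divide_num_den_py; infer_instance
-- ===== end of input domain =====

-- B collects all slash positions first, then tests each candidate prefix by counting parentheses;
-- A is a single depth-tracking scan with break. Proved equal on all inputs (both are total).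

-- ===== PORT A =====
-- A's for-loop over enumerate(s) with depth counter and break (result: split_at, -1 if no break)
def pvAloop : List (Int × Char) → Int → Int
  | [], _ => -1
  | (i, ch) :: rest, depth =>
    if ch = '(' then pvAloop rest (depth + 1)
    else if ch = ')' then pvAloop rest (depth - 1)
    else if ch = '/' ∧ depth = 0 then i
    else pvAloop rest depth

def divide_num_den_py (formula : String) : Option String × Option String :=
  if PySem.Str.isIn "/" (PySem.Str.strip formula) = false then (none, none) else
  if pvAloop (PySem.List.enumerate (PySem.Str.strip formula).toList 0) 0 < 0 then (none, none)
  else (some (PySem.Str.strip (PySem.Str.slice (PySem.Str.strip formula) none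
                (some (pvAloop (PySem.List.enumerate (PySem.Str.strip formula).toList 0) 0)))),
        some (PySem.Str.strip (PySem.Str.slice (PySem.Str.strip formula)
                (some (pvAloop (PySem.List.enumerate (PySem.Str.strip formula).toList 0) 0 + 1)) none)))

-- ===== PORT B =====
-- B's for-loop over the precomputed slash positions, testing prefix balance by counting
def pvBtry (s : String) : List Int → Option String × Option String
  | [] => (none, none)
  | i :: rest =>
    if PySem.Str.count (PySem.Str.slice s none (some i)) "(" = PySem.Str.count (PySem.Str.slice s none (some i)) ")" then
      (some (PySem.Str.strip (PySem.Str.slice s none (some i))),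
       some (PySem.Str.strip (PySem.Str.slice s (some (i + 1)) none)))
    else pvBtry s rest

def divide_num_den_py_alt (formula : String) : Option String × Option String :=
  pvBtry (PySem.Str.strip formula)
    (((PySem.List.enumerate (PySem.Str.strip formula).toList 0).filter (fun p => p.2 == '/')).map (·.1))

-- ===== PRECONDITION & SPEC =====
def Spec_divide_num_den_py (formula : String) (out : Option String × Option String) : Prop := out = divide_num_den_py_alt formula
instance (formula : String) (out : Option String × Option String) : Decidable (Spec_divide_num_den_py formula out) := by unfold Spec_divide_num_den_py; infer_instance

-- ===== CLAIM (what is proved, stated in full; the proofs are below) =====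
def Claim_equal_divide_num_den_py : Prop := ∀ (formula : String), Dom_divide_num_den_py formula → Spec_divide_num_den_py formula (divide_num_den_py formula)

-- ===== LEMMAS AND PROOFS =====

-- proof-side abbreviation for A's post-loop wrap-up
def pvWrap (s : String) (sp : Int) : Option String × Option String :=
  if sp < 0 then (none, none)
  else (some (PySem.Str.strip (PySem.Str.slice s none (some sp))),
        some (PySem.Str.strip (PySem.Str.slice s (some (sp + 1)) none)))

-- Python str.count with a single-character needle is List.count
theorem pv_count_go_single (c : Char) : ∀ (fuel : Nat) (l : List Char) (acc : Nat),
    l.length ≤ fuel → PySem.Chars.count.go [c] fuel l acc = acc + l.count c := by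
  intro fuel
  induction fuel with
  | zero => intro l acc h; cases l with
    | nil => simp [PySem.Chars.count.go]
    | cons x t => simp at h
  | succ n ih =>
    intro l acc h
    cases l with
    | nil => simp [PySem.Chars.count.go]
    | cons x t =>
      have ht : t.length ≤ n := by simp at h; omega
      by_cases hx : c = x
      · subst hx
        have hp : ([c].isPrefixOf (c :: t)) = true := by simp [List.isPrefixOf]
        simp only [PySem.Chars.count.go, hp, if_pos]
        rw [show List.drop [c].length (c :: t) = t by simp]
        rw [ih t (acc + 1) ht]
        simp
        omega
      · have hp : ([c].isPrefixOf (x :: t)) = false := by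
          simp [List.isPrefixOf]; exact hx
        simp only [PySem.Chars.count.go, hp, Bool.false_eq_true, if_false]
        rw [ih t acc ht]
        have : List.count c (x :: t) = List.count c t := by
          simp [List.count_cons]; exact fun hh => hx hh.symm
        rw [this]

theorem pv_count_single (l : List Char) (c : Char) :
    PySem.Chars.count l [c] = l.count c := by
  simp [PySem.Chars.count]
  simpa using pv_count_go_single c l.length l 0 le_rfl

-- The two loops agree: induction over the remaining suffix of the stripped string,
-- with pre the consumed prefix (A's depth = count '(' pre - count ')' pre).
theorem pv_loops_agree (s : String) : ∀ (suf pre : List Char), s.toList = pre ++ suf →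
    pvBtry s (((PySem.List.enumerate suf (pre.length : Int)).filter (fun p => p.2 == '/')).map (·.1))
      = pvWrap s (pvAloop (PySem.List.enumerate suf (pre.length : Int)) ((pre.count '(' : Int) - (pre.count ')' : Int))) := by
  intro suf
  induction suf with
  | nil => intro pre h; simp [PySem.List.enumerate, pvBtry, pvAloop, pvWrap]
  | cons c rest ih =>
    intro pre h
    have hIH := ih (pre ++ [c]) (by simpa [List.append_assoc] using h)
    rw [show ((pre ++ [c]).length : Int) = (pre.length : Int) + 1 by simp] at hIH
    rw [PySem.List.enumerate_cons, List.filter_cons]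
    by_cases hpo : c = '('
    · subst hpo
      rw [show ((((pre.length : Int), '(')).2 == '/') = false from rfl]
      rw [if_neg (by decide)]
      rw [show pvAloop (((pre.length : Int), '(') :: PySem.List.enumerate rest ((pre.length : Int) + 1)) ((pre.count '(' : Int) - (pre.count ')' : Int))
            = pvAloop (PySem.List.enumerate rest ((pre.length : Int) + 1)) ((pre.count '(' : Int) - (pre.count ')' : Int) + 1) from by
        simp [pvAloop]]
      rw [show ((pre ++ ['(']).count '(' : Int) = (pre.count '(' : Int) + 1 by simp] at hIH
      rw [show ((pre ++ ['(']).count ')' : Int) = (pre.count ')' : Int) by simp] at hIH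
      rw [hIH]; ring_nf
    · by_cases hpc : c = ')'
      · subst hpc
        rw [show ((((pre.length : Int), ')')).2 == '/') = false from rfl]
        rw [if_neg (by decide)]
        rw [show pvAloop (((pre.length : Int), ')') :: PySem.List.enumerate rest ((pre.length : Int) + 1)) ((pre.count '(' : Int) - (pre.count ')' : Int))
              = pvAloop (PySem.List.enumerate rest ((pre.length : Int) + 1)) ((pre.count '(' : Int) - (pre.count ')' : Int) - 1) from by
          simp [pvAloop]]
        rw [show ((pre ++ [')']).count '(' : Int) = (pre.count '(' : Int) by simp] at hIH
        rw [show ((pre ++ [')']).count ')' : Int) = (pre.count ')' : Int) + 1 by simp] at hIH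
        rw [hIH]; ring_nf
      · have hslice : (PySem.Str.slice s none (some (pre.length : Int))).toList = pre := by
          simp [PySem.List.slice_to, h]
        by_cases hsl : c = '/'
        · subst hsl
          rw [show ((((pre.length : Int), '/')).2 == '/') = true from rfl]
          rw [if_pos rfl]
          rw [List.map_cons]
          show pvBtry s (_ :: _) = _
          rw [pvBtry]
          rw [show PySem.Str.count (PySem.Str.slice s none (some (pre.length : Int))) "(" = pre.count '(' from by
            rw [PySem.Str.count_eq, hslice]; exact pv_count_single pre '(']
          rw [show PySem.Str.count (PySem.Str.slice s none (some (pre.length : Int))) ")" = pre.count ')' from by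
            rw [PySem.Str.count_eq, hslice]; exact pv_count_single pre ')']
          by_cases hbal : pre.count '(' = pre.count ')'
          · rw [if_pos hbal]
            rw [show pvAloop (((pre.length : Int), '/') :: PySem.List.enumerate rest ((pre.length : Int) + 1)) ((pre.count '(' : Int) - (pre.count ')' : Int))
                  = (pre.length : Int) from by
              simp [pvAloop]; intro hh; omega]
            rw [pvWrap, if_neg (by omega)]
          · rw [if_neg hbal]
            rw [show pvAloop (((pre.length : Int), '/') :: PySem.List.enumerate rest ((pre.length : Int) + 1)) ((pre.count '(' : Int) - (pre.count ')' : Int))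
                  = pvAloop (PySem.List.enumerate rest ((pre.length : Int) + 1)) ((pre.count '(' : Int) - (pre.count ')' : Int)) from by
              simp [pvAloop]; intro hh; exact absurd hh (by omega)]
            rw [show ((pre ++ ['/']).count '(' : Int) = (pre.count '(' : Int) by simp] at hIH
            rw [show ((pre ++ ['/']).count ')' : Int) = (pre.count ')' : Int) by simp] at hIH
            exact hIH
        · rw [show ((((pre.length : Int), c)).2 == '/') = (c == '/') from rfl]
          rw [show (c == '/') = false by simpa using hsl]
          rw [if_neg (by decide)]
          rw [show pvAloop (((pre.length : Int), c) :: PySem.List.enumerate rest ((pre.length : Int) + 1)) ((pre.count '(' : Int) - (pre.count ')' : Int))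
                = pvAloop (PySem.List.enumerate rest ((pre.length : Int) + 1)) ((pre.count '(' : Int) - (pre.count ')' : Int)) from by
            simp [pvAloop, hpo, hpc]; intro hh; exact absurd hh hsl]
          rw [show ((pre ++ [c]).count '(' : Int) = (pre.count '(' : Int) by
            have h0 : List.count '(' [c] = 0 := List.count_eq_zero.mpr (by simp; exact fun hh => hpo hh.symm)
            simp [List.count_append, h0]] at hIH
          rw [show ((pre ++ [c]).count ')' : Int) = (pre.count ')' : Int) by
            have h0 : List.count ')' [c] = 0 := List.count_eq_zero.mpr (by simp; exact fun hh => hpc hh.symm)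
            simp [List.count_append, h0]] at hIH
          exact hIH

theorem pv_no_slash_filter (s : String) (h : PySem.Str.isIn "/" s = false) :
    ((PySem.List.enumerate s.toList 0).filter (fun p => p.2 == '/')) = [] := by
  have hmem : '/' ∉ s.toList := by
    intro hm
    obtain ⟨l₁, l₂, heq⟩ := List.append_of_mem hm
    have hinf : ("/" : String).toList <:+: s.toList := by rw [heq]; exact ⟨l₁, l₂, by simp⟩
    have := (PySem.Str.isIn_iff_infix "/" s).mpr hinf
    rw [h] at this; exact absurd this (by simp)
  rw [List.filter_eq_nil_iff]
  intro p hp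
  obtain ⟨k, hk, rfl⟩ := (PySem.List.mem_enumerate_iff _ _ _).mp hp
  simp only [beq_iff_eq]
  intro hc
  exact hmem (hc ▸ List.getElem_mem hk)

-- ===== VERDICT (by name: the statement is the Claim_ definition above) =====
theorem divide_num_den_py_spec : Claim_equal_divide_num_den_py := by
  unfold Claim_equal_divide_num_den_py
  intro formula _
  unfold Spec_divide_num_den_py divide_num_den_py divide_num_den_py_alt
  by_cases h : PySem.Str.isIn "/" (PySem.Str.strip formula) = false
  · rw [if_pos h, pv_no_slash_filter _ h]
    simp [pvBtry]
  · rw [if_neg h]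
    have := pv_loops_agree (PySem.Str.strip formula) (PySem.Str.strip formula).toList [] (by simp)
    simp only [List.length_nil, Nat.cast_zero, List.count_nil, Int.sub_zero] at this
    rw [this]
    rw [pvWrap]
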